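-- pv_equiv track=rewrite | github.com/yz4004/leetcodeCollection | a_cf/灵茶每日/1224.py | solve
-- ===== SOURCE A (Python) =====
-- max_ = lambda x, y: x if x > y else y
--
-- MOD = 998244353
--
-- def solve(n, a):
--     # 挡板贪心 - 两两移除不同值 + 背包 + 贡献法
--
--     # 对每个a的子序列b 考虑 f(b)
--     # f(b) 给定球计数序列 b 每次移除两个不同值的球 至少操作次数
--     # 根据两两移除不同值的挡板贪心 对单个子序列b 由b的max和b的和决定
--     # - max(max(b), (sum(b)+1)//2)
--
--     # 提示 sum(a) < 5000 - 按子序列和背包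
--
--     # 对a排序后每次引入的x就是max 由x参与的子序列和 以及x可以决定该子序列贡献
--
--     a.sort()
--     u = sum(a)
--     f = [0]*(u+1)
--     f[0] = 1
--     res = 0
--     for x in a:
--         for i in range(u, x-1, -1):
--             f[i] += f[i-x]
--             res += max_((i + 1) // 2, x) * f[i-x]  # 引入x后 sum=i 的子序列新增数量 f[i-x] 以及对应的最少移除次数 max_((i + 1) // 2, x)
--
--             f[i] %= MOD
--             res %= MOD
--
--         # 分开计算会重复计入之前x没参与的那些子数组
--         # for i in range(x, u+1):
--         #     res += max_((i+1)//2, x) * f[i]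
--     return res
-- ===== SOURCE B (Python) =====
-- MOD = 998244353
--
-- def solve(n, a):
--     # Split max((s+1)//2, x) into base part (s+1)//2 plus excess max(0, x-(s+1)//2):
--     # one forward copy-based subset-sum sweep accumulating the excess per new maximum,
--     # then the base computed from the final sum-count table.  (A sorts `a` in place;
--     # B does not mutate `a` — the equivalence claimed is about the return value.)
--     b = sorted(a)
--     u = sum(b)
--     g = [1] + [0] * u
--     excess = 0
--     for x in b:
--         for s in range(x):
--             excess = (excess + (x - (s + x + 1) // 2) * g[s]) % MOD
--         g = g[:x] + [(g[i] + g[i - x]) % MOD for i in range(x, u + 1)]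
--     base = 0
--     for s in range(u + 1):
--         base = (base + ((s + 1) // 2) * g[s]) % MOD
--     return (base + excess) % MOD
-- ===== Notes on version B (the rewrite author's own statement) =====
-- stated objective: alternative
-- what changed: B replaces A's fused backward in-place knapsack (res += max((i+1)//2,x)*f[i-x] inside the DP update) by the split max(c,x)=c+max(0,x-c): a forward copy-based subset-sum sweep that accumulates only the 'excess' part per new maximum, with the 'base' part computed once from the final sum-count table.
import Mathlib
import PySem

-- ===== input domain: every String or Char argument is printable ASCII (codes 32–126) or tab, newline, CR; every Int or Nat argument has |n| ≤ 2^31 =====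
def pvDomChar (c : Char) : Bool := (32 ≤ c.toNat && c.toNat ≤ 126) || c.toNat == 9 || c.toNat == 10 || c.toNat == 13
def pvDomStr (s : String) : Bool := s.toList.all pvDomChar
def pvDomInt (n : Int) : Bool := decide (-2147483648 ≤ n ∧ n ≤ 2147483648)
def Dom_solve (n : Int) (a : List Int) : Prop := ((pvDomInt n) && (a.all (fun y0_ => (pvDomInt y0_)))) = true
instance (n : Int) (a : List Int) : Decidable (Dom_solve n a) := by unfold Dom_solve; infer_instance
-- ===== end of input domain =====

-- B splits max((s+1)//2, x) as (s+1)//2 + max(0, x-(s+1)//2): one forward copy-based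
-- subset-sum sweep accumulating the excess per new maximum, plus a base part from the
-- final count table (alternative decomposition, not claimed faster).  A sorts `a` in
-- place, B does not mutate it: the equivalence claimed is about the return value only.

-- ===== PORT A =====
def max_ (x y : Int) : Int := if x > y then x else y

def pymod : Int := 998244353

def stepA (x : Int) (st : List Int × Int) (i : Int) : List Int × Int :=
  let f := st.1
  let res := st.2
  let f1 := PySem.List.pySetD f i (PySem.List.pyGetD f i 0 + PySem.List.pyGetD f (i-x) 0)
  let res1 := res + max_ (PySem.Int.floordiv (i+1) 2) x * PySem.List.pyGetD f1 (i-x) 0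
  let f2 := PySem.List.pySetD f1 i (PySem.Int.mod (PySem.List.pyGetD f1 i 0) pymod)
  (f2, PySem.Int.mod res1 pymod)

def passA (u : Int) (st : List Int × Int) (x : Int) : List Int × Int :=
  (PySem.List.pyRange u (x-1) (-1)).foldl (stepA x) st

def solve (n : Int) (a : List Int) : Int :=
  let b := PySem.List.sorted a (fun y => y) false
  let u := b.sum
  let f0 := PySem.List.pySetD (PySem.List.pyRepeat [(0:Int)] (u+1)) 0 1
  (b.foldl (passA u) (f0, 0)).2

-- ===== PORT B =====
def stepBex (x : Int) (g : List Int) (e s : Int) : Int :=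
  PySem.Int.mod (e + (x - PySem.Int.floordiv (s + x + 1) 2) * PySem.List.pyGetD g s 0) pymod

def passB (u : Int) (p : List Int × Int) (x : Int) : List Int × Int :=
  let g := p.1
  let ex := (PySem.List.pyRange 0 x 1).foldl (stepBex x g) p.2
  let g' := PySem.List.slice g none (some x) ++
      (PySem.List.pyRange x (u+1) 1).map
        (fun i => PySem.Int.mod (PySem.List.pyGetD g i 0 + PySem.List.pyGetD g (i-x) 0) pymod)
  (g', ex)

def solve_alt (n : Int) (a : List Int) : Int :=
  let b := PySem.List.sorted a (fun y => y) false
  let u := b.sum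
  let st := b.foldl (passB u) ([(1:Int)] ++ PySem.List.pyRepeat [(0:Int)] u, 0)
  let base := (PySem.List.pyRange 0 (u+1) 1).foldl
      (fun bs s => PySem.Int.mod (bs + PySem.Int.floordiv (s+1) 2 * PySem.List.pyGetD st.1 s 0) pymod) 0
  PySem.Int.mod (base + st.2) pymod

-- ===== PRECONDITION & SPEC =====
-- Pre_ excludes exactly the lists containing a negative element: on every such list the
-- Python A raises IndexError (f[i-x] with i-x > u on the first pass, or f[0]=1 on an
-- empty table), so A returns on precisely the inputs admitted here.
def Pre_solve (n : Int) (a : List Int) : Prop := ∀ x ∈ a, 0 ≤ x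
instance (n : Int) (a : List Int) : Decidable (Pre_solve n a) := by unfold Pre_solve; infer_instance

def pvWitness_solve : Int × List Int := (3, [1, 2, 2])

def Spec_solve (n : Int) (a : List Int) (out : Int) : Prop := out = solve_alt n a
instance (n : Int) (a : List Int) (out : Int) : Decidable (Spec_solve n a out) := by unfold Spec_solve; infer_instance

-- ===== CLAIM (what is proved, stated in full; the proofs are below) =====
def Claim_equal_solve : Prop := ∀ (n : Int) (a : List Int), Dom_solve n a → Pre_solve n a → Spec_solve n a (solve n a)

-- ===== LEMMAS AND PROOFS =====

-- proof-side abbreviations (definitionally the expressions occurring in the ports)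
def castZ (a : Int) : ZMod 998244353 := (a : ZMod 998244353)
def wc (k : ℕ) : ZMod 998244353 := castZ (PySem.Int.floordiv ((k:Int)+1) 2)
def getI (t : List Int) (i : Int) : Int := PySem.List.pyGetD t i 0
def newv (f : List Int) (x i : Int) : Int := PySem.Int.mod (getI f i + getI f (i-x)) pymod
def contrib (f : List Int) (x i : Int) : Int :=
  max_ (PySem.Int.floordiv (i+1) 2) x * (if x = 0 then getI f i + getI f i else getI f (i-x))
def updTo (f : List Int) (x m : Int) : List Int :=
  f.take x.toNat ++ (PySem.List.pyRange x (m+1) 1).map (newv f x) ++ f.drop (m+1).toNat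
def phiOff : List Int → ℕ → ZMod 998244353
  | [], _ => 0
  | c :: t, k => wc k * (c : ZMod 998244353) + phiOff t (k+1)
def phi (t : List Int) : ZMod 998244353 := phiOff t 0

lemma pymod_pos : (0:Int) < pymod := by norm_num [pymod]

lemma mod_eq (a : Int) : PySem.Int.mod a pymod = a % pymod :=
  PySem.Int.mod_eq_emod_of_pos pymod_pos

lemma mod_bounds (a : Int) : 0 ≤ PySem.Int.mod a pymod ∧ PySem.Int.mod a pymod < pymod := by
  rw [mod_eq]
  exact ⟨Int.emod_nonneg a (by norm_num [pymod]), Int.emod_lt_of_pos a pymod_pos⟩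

lemma castZ_mod (a : Int) : castZ (PySem.Int.mod a pymod) = castZ a := by
  rw [mod_eq]
  have h : pymod = ((998244353 : ℕ) : Int) := by norm_num [pymod]
  rw [h]
  exact ZMod.intCast_mod a 998244353

lemma castZ_add (a b : Int) : castZ (a + b) = castZ a + castZ b := by
  simp [castZ]

lemma castZ_mul (a b : Int) : castZ (a * b) = castZ a * castZ b := by
  simp [castZ]

lemma getI_natCast (t : List Int) (j : ℕ) : getI t (j:Int) = t.getD j 0 := by
  simp [getI]

lemma getI_of_nonneg (t : List Int) (i : Int) (h : 0 ≤ i) : getI t i = t.getD i.toNat 0 := by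
  simp [getI, PySem.List.pyGetD, PySem.List.pyGet?_of_nonneg t h, List.getD_eq_getElem?_getD]

lemma getI_out (t : List Int) (i : Int) (h : (t.length:Int) ≤ i) : getI t i = 0 := by
  have hn : PySem.List.pyGet? t i = none := by
    rw [PySem.List.pyGet?_eq_none_iff]
    intro hr
    exact absurd hr.2 (by omega)
  exact PySem.List.pyGetD_of_none t i 0 hn

lemma getI_set_ne (t : List Int) (m : ℕ) (v : Int) (i : Int) (h0 : 0 ≤ i) (hne : i.toNat ≠ m) :
    getI (t.set m v) i = getI t i := by
  rw [getI_of_nonneg _ _ h0, getI_of_nonneg _ _ h0, List.getD_eq_getElem?_getD,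
    List.getD_eq_getElem?_getD, List.getElem?_set_ne (by omega)]

lemma getI_set_self (t : List Int) (m : ℕ) (v : Int) (h : m < t.length) :
    getI (t.set m v) (m:Int) = v := by
  rw [getI_natCast, List.getD_eq_getElem?_getD, List.getElem?_set_self (by simpa using h)]
  rfl

lemma getI_def (t : List Int) (i : Int) : PySem.List.pyGetD t i 0 = getI t i := rfl

lemma stepA_eq (x : Int) (f : List Int) (res i : Int) (hx : 0 ≤ x) (hi : x ≤ i)
    (hlen : i < (f.length:Int)) :
    stepA x (f, res) i = (f.set i.toNat (newv f x i), PySem.Int.mod (res + contrib f x i) pymod) := by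
  have hi0 : 0 ≤ i := le_trans hx hi
  have hilen : i.toNat < f.length := by omega
  have hc : ((i.toNat : ℕ) : Int) = i := Int.toNat_of_nonneg hi0
  simp only [stepA, getI_def]
  rw [PySem.List.pySetD_of_nonneg f _ hi0, PySem.List.pySetD_of_nonneg _ _ hi0]
  have hA : getI (f.set i.toNat (getI f i + getI f (i-x))) i = getI f i + getI f (i-x) := by
    rw [← hc]; exact getI_set_self f i.toNat _ hilen
  have hB : getI (f.set i.toNat (getI f i + getI f (i-x))) (i-x)
      = if x = 0 then getI f i + getI f i else getI f (i-x) := by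
    by_cases hx0 : x = 0
    · subst hx0
      rw [if_pos rfl]
      simpa using hA
    · rw [if_neg hx0]
      exact getI_set_ne f i.toNat _ (i-x) (by omega) (by omega)
  rw [hA, hB, List.set_set]
  unfold newv contrib
  by_cases hx0 : x = 0
  · subst hx0; simp
  · simp [hx0]

lemma updTo_base (f : List Int) (x : Int) (hx : 0 ≤ x) : updTo f x (x-1) = f := by
  have h1 : x - 1 + 1 = x := by ring
  unfold updTo
  rw [h1, PySem.List.pyRange_one_eq_nil (le_refl x)]
  simp [List.take_append_drop]

lemma newv_congr (f : List Int) (m : ℕ) (v : Int) (x i : Int) (hx : 0 ≤ x) (hxi : x ≤ i)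
    (him : i < (m:Int)) : newv (f.set m v) x i = newv f x i := by
  unfold newv
  rw [getI_set_ne f m v i (by omega) (by omega), getI_set_ne f m v (i-x) (by omega) (by omega)]

lemma updTo_step (f : List Int) (x m : Int) (hx : 0 ≤ x) (hxm : x ≤ m) (hm : m < (f.length:Int)) :
    updTo (f.set m.toNat (newv f x m)) x (m-1) = updTo f x m := by
  have hm0 : 0 ≤ m := le_trans hx hxm
  have hmN : m.toNat < f.length := by omega
  unfold updTo
  have ht : (f.set m.toNat (newv f x m)).take x.toNat = f.take x.toNat := by
    rw [List.take_set, List.set_eq_of_length_le (by simp; omega)]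
  have hd : (f.set m.toNat (newv f x m)).drop (m-1+1).toNat = newv f x m :: f.drop (m+1).toNat := by
    have h1 : (m-1+1).toNat = m.toNat := by omega
    have h2 : (m+1).toNat = m.toNat + 1 := by omega
    rw [h1, h2, List.drop_set, if_neg (lt_irrefl m.toNat), Nat.sub_self,
      List.drop_eq_getElem_cons hmN, List.set_cons_zero]
  have hmid : (PySem.List.pyRange x (m-1+1)).map (newv (f.set m.toNat (newv f x m)) x)
      = (PySem.List.pyRange x m).map (newv f x) := by
    have h1 : m - 1 + 1 = m := by ring
    rw [h1]
    exact List.map_congr_left (fun i hi => by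
      rw [PySem.List.mem_pyRange_one] at hi
      exact newv_congr f m.toNat _ x i hx hi.1 (by omega))
  rw [ht, hd, hmid, PySem.List.pyRange_one_succ_right hxm, List.map_append]
  simp [List.append_assoc]

lemma contrib_congr (f : List Int) (m : ℕ) (v : Int) (x i : Int) (hx : 0 ≤ x) (hxi : x ≤ i)
    (him : i < (m:Int)) : contrib (f.set m v) x i = contrib f x i := by
  unfold contrib
  rw [getI_set_ne f m v i (by omega) (by omega), getI_set_ne f m v (i-x) (by omega) (by omega)]

lemma passA_ind (x : Int) (hx : 0 ≤ x) : ∀ (k : ℕ) (m : Int) (f : List Int) (res : Int),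
    m = x - 1 + k → m < (f.length:Int) → 0 ≤ res → res < pymod →
    ∃ r : Int, (PySem.List.pyRange m (x-1) (-1)).foldl (stepA x) (f, res) = (updTo f x m, r) ∧
      0 ≤ r ∧ r < pymod ∧
      castZ r = castZ res + ((PySem.List.pyRange m (x-1) (-1)).map (fun i => castZ (contrib f x i))).sum := by
  intro k
  induction k with
  | zero =>
    intro m f res hm hlen h0 h1
    have hm' : m = x - 1 := by omega
    subst hm'
    rw [PySem.List.pyRange_neg_one_eq_nil (le_refl (x-1))]
    exact ⟨res, by rw [List.foldl_nil, updTo_base f x hx], h0, h1, by simp⟩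
  | succ k ih =>
    intro m f res hm hlen h0 h1
    have hxm : x ≤ m := by omega
    rw [PySem.List.pyRange_neg_one_cons (by omega : x - 1 < m), List.foldl_cons,
      stepA_eq x f res m hx hxm hlen]
    have hb := mod_bounds (res + contrib f x m)
    obtain ⟨r, heq, hr0, hr1, hcast⟩ := ih (m-1) (f.set m.toNat (newv f x m))
      (PySem.Int.mod (res + contrib f x m) pymod) (by omega)
      (by rw [List.length_set]; omega) hb.1 hb.2
    refine ⟨r, ?_, hr0, hr1, ?_⟩
    · rw [heq, updTo_step f x m hx hxm hlen]
    · rw [hcast, castZ_mod, castZ_add, List.map_cons, List.sum_cons]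
      have hsum : ((PySem.List.pyRange (m-1) (x-1) (-1)).map
            (fun i => castZ (contrib (f.set m.toNat (newv f x m)) x i))).sum
          = ((PySem.List.pyRange (m-1) (x-1) (-1)).map (fun i => castZ (contrib f x i))).sum := by
        congr 1
        exact List.map_congr_left (fun i hi => by
          rw [PySem.List.mem_pyRange_neg_one] at hi
          rw [contrib_congr f m.toNat _ x i hx (by omega) (by omega)])
      rw [hsum]
      ring

lemma phiOff_append (s t : List Int) (k : ℕ) :
    phiOff (s ++ t) k = phiOff s k + phiOff t (k + s.length) := by
  induction s generalizing k with
  | nil => simp [phiOff]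
  | cons c s ih =>
    simp only [List.cons_append, phiOff, ih (k+1), List.length_cons]
    have : k + 1 + s.length = k + (s.length + 1) := by omega
    rw [this, add_assoc]

lemma phiOff_replicate (n k : ℕ) : phiOff (List.replicate n 0) k = 0 := by
  induction n generalizing k with
  | zero => simp [phiOff]
  | succ n ih => simp [List.replicate_succ, phiOff, ih]

lemma phiOff_eq_sum (L : List Int) (k : ℕ) :
    phiOff L k = ∑ j ∈ Finset.range L.length, wc (k + j) * castZ (L.getD j 0) := by
  induction L generalizing k with
  | nil => simp [phiOff]
  | cons c t ih =>
    simp only [phiOff, List.length_cons, Finset.sum_range_succ', ih (k+1)]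
    have h0 : (c :: t).getD 0 0 = c := rfl
    have h1 : ∀ j : ℕ, (c :: t).getD (j+1) 0 = t.getD j 0 := fun j => rfl
    have h2 : ∀ j : ℕ, k + (j + 1) = k + 1 + j := fun j => by omega
    have h3 : ∑ j ∈ Finset.range t.length, wc (k + (j+1)) * castZ ((c :: t).getD (j+1) 0)
        = ∑ j ∈ Finset.range t.length, wc (k + 1 + j) * castZ (t.getD j 0) :=
      Finset.sum_congr rfl (fun j _ => by rw [h1 j, h2 j])
    rw [h3, h0]
    simp only [Nat.add_zero, castZ]
    ring

lemma sum_map_range (N : ℕ) (F : ℕ → ZMod 998244353) :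
    ((List.range N).map F).sum = ∑ j ∈ Finset.range N, F j := by
  induction N with
  | zero => simp
  | succ N ih => rw [List.range_succ, List.map_append, List.sum_append, Finset.sum_range_succ, ih]; simp

lemma foldmod_cast (l : List Int) (h : Int → Int) : ∀ a0 : Int,
    castZ (l.foldl (fun acc t => PySem.Int.mod (acc + h t) pymod) a0)
      = castZ a0 + (l.map (fun t => castZ (h t))).sum := by
  induction l with
  | nil => intro a0; simp
  | cons t l ih =>
    intro a0
    rw [List.foldl_cons, ih, castZ_mod, castZ_add, List.map_cons, List.sum_cons]
    ring

lemma tableB_eq (g : List Int) (x u : Int) (hx : 0 ≤ x) (hu : 0 ≤ u)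
    (hlen : g.length = (u+1).toNat) :
    PySem.List.slice g none (some x) ++
      (PySem.List.pyRange x (u+1) 1).map
        (fun i => PySem.Int.mod (PySem.List.pyGetD g i 0 + PySem.List.pyGetD g (i-x) 0) pymod)
    = updTo g x u := by
  unfold updTo
  rw [PySem.List.slice_to g hx, List.drop_eq_nil_of_le (by omega), List.append_nil]
  rfl

lemma length_updTo (f : List Int) (x m : Int) (hx : 0 ≤ x) (hxm : x - 1 ≤ m)
    (hm : m < (f.length:Int)) : (updTo f x m).length = f.length := by
  simp [updTo, PySem.List.length_pyRange_one]
  omega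

lemma getI_updTo_mid (f : List Int) (x m i : Int) (hx : 0 ≤ x) (hxi : x ≤ i) (him : i ≤ m)
    (hm : m < (f.length:Int)) : getI (updTo f x m) i = newv f x i := by
  have hi0 : 0 ≤ i := le_trans hx hxi
  have hxlen : x.toNat ≤ f.length := by omega
  have hlt : (f.take x.toNat).length = x.toNat := by simp; omega
  rw [getI_of_nonneg _ _ hi0, List.getD_eq_getElem?_getD]
  unfold updTo
  rw [List.append_assoc, List.getElem?_append_right (by rw [hlt]; omega), hlt,
    List.getElem?_append_left (by
      simp [PySem.List.length_pyRange_one]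
      omega),
    List.getElem?_map, PySem.List.getElem?_pyRange_one]
  rw [if_pos (by omega)]
  simp only [Option.map_some, Option.getD_some]
  congr 1
  omega

lemma getD_map_pyRange' (h : Int → Int) (aa b : Int) (j : ℕ) (hj : j < (b - aa).toNat) :
    ((PySem.List.pyRange aa b).map h).getD j 0 = h (aa + j) := by
  rw [List.getD_eq_getElem?_getD, List.getElem?_map, PySem.List.getElem?_pyRange_one, if_pos hj]
  rfl

lemma maxsplit (x s : Int) :
    max_ (PySem.Int.floordiv (x + s + 1) 2) x
      = PySem.Int.floordiv (x + s + 1) 2 + (if s < x then x - PySem.Int.floordiv (x + s + 1) 2 else 0) := by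
  rw [PySem.Int.floordiv_eq_ediv_of_pos (by norm_num)]
  unfold max_
  split_ifs <;> omega

lemma wc_zero : wc 0 = 0 := by
  have h : PySem.Int.floordiv ((0:ℕ) + 1) 2 = 0 := by decide
  rw [wc, h]
  simp [castZ]

lemma castZ_zero : castZ 0 = 0 := by simp [castZ]

lemma pass_sum (g : List Int) (x msum u : Int) (hx : 0 ≤ x) (hmsum : 0 ≤ msum)
    (hxu : msum + x ≤ u) (hlen : g.length = (u+1).toNat)
    (hsup : ∀ i : Int, msum < i → getI g i = 0) (hzero : x = 0 → msum = 0) :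
    ((PySem.List.pyRange u (x-1) (-1)).map (fun i => castZ (contrib g x i))).sum
      = ((PySem.List.pyRange 0 x 1).map
          (fun s => castZ ((x - PySem.Int.floordiv (s + x + 1) 2) * getI g s))).sum
        + (phi (updTo g x u) - phi g) := by
  have hu0 : 0 ≤ u := by omega
  have hx1 : x - 1 + 1 = x := by ring
  have hxlen : x.toNat ≤ g.length := by omega
  set N := ((u+1) - x).toNat with hNdef
  have hNlt : (N:Int) = u + 1 - x := by omega
  have htak : (g.take x.toNat).length = x.toNat := by simp [List.length_take, hlen]; omega
  -- phi decomposition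
  have hphi1 : phi (updTo g x u) = phiOff (g.take x.toNat) 0
      + phiOff ((PySem.List.pyRange x (u+1)).map (newv g x)) x.toNat := by
    unfold phi updTo
    rw [List.drop_eq_nil_of_le (by omega), List.append_nil, phiOff_append, htak]
    simp
  have hphi2 : phi g = phiOff (g.take x.toNat) 0 + phiOff (g.drop x.toNat) x.toNat := by
    unfold phi
    conv_lhs => rw [← List.take_append_drop x.toNat g]
    rw [phiOff_append, htak]
    simp
  have hmid : phiOff ((PySem.List.pyRange x (u+1)).map (newv g x)) x.toNat
      = ∑ j ∈ Finset.range N, wc (x.toNat + j) * castZ (newv g x (x + j)) := by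
    rw [phiOff_eq_sum]
    have hlm : ((PySem.List.pyRange x (u+1)).map (newv g x)).length = N := by
      simp [PySem.List.length_pyRange_one]
      omega
    rw [hlm]
    exact Finset.sum_congr rfl (fun j hj => by
      rw [getD_map_pyRange' (newv g x) x (u+1) j (by rw [Finset.mem_range] at hj; omega)])
  have hdrop : phiOff (g.drop x.toNat) x.toNat
      = ∑ j ∈ Finset.range N, wc (x.toNat + j) * castZ (g.getD (x.toNat + j) 0) := by
    rw [phiOff_eq_sum]
    have hld : (g.drop x.toNat).length = N := by simp [hlen]; omega
    rw [hld]
    exact Finset.sum_congr rfl (fun j hj => by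
      rw [List.getD_eq_getElem?_getD, List.getElem?_drop, ← List.getD_eq_getElem?_getD])
  have hdiff : phi (updTo g x u) - phi g
      = ∑ j ∈ Finset.range N, wc (x.toNat + j) * castZ (getI g (j:Int)) := by
    rw [hphi1, hphi2, hmid, hdrop]
    have h1 : ∀ j ∈ Finset.range N,
        wc (x.toNat + j) * castZ (newv g x (x + j)) - wc (x.toNat + j) * castZ (g.getD (x.toNat + j) 0)
          = wc (x.toNat + j) * castZ (getI g (j:Int)) := by
      intro j hj
      have h2 : castZ (newv g x (x + j)) = castZ (getI g (x + j)) + castZ (getI g (j:Int)) := by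
        unfold newv
        rw [castZ_mod, castZ_add]
        have h3 : x + (j:Int) - x = (j:Int) := by ring
        rw [h3]
      have h4 : castZ (g.getD (x.toNat + j) 0) = castZ (getI g (x + j)) := by
        rw [getI_of_nonneg g (x + j) (by omega)]
        congr 2
        omega
      rw [h2, h4]
      ring
    rw [← Finset.sum_congr rfl h1, Finset.sum_sub_distrib]
    ring
  -- LHS: descending range is the reverse of the ascending one
  rw [PySem.List.pyRange_neg_one_eq_reverse, hx1, List.map_reverse, List.sum_reverse]
  have hL : ((PySem.List.pyRange x (u+1)).map (fun i => castZ (contrib g x i))).sum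
      = ∑ j ∈ Finset.range N, castZ (contrib g x (x + j)) := by
    rw [PySem.List.pyRange_one x (u+1), List.map_map, sum_map_range]
    rfl
  have hE : ((PySem.List.pyRange 0 x).map
        (fun s => castZ ((x - PySem.Int.floordiv (s + x + 1) 2) * getI g s))).sum
      = ∑ j ∈ Finset.range x.toNat, castZ (x - PySem.Int.floordiv ((j:Int) + x + 1) 2) * castZ (getI g (j:Int)) := by
    rw [PySem.List.pyRange_one 0 x, List.map_map]
    have h0 : (x - 0).toNat = x.toNat := by omega
    rw [h0, sum_map_range]
    exact Finset.sum_congr rfl (fun j hj => by simp [Function.comp, castZ_mul])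
  rw [hL, hE, hdiff]
  by_cases hx0 : x = 0
  · subst hx0
    have hm0 : msum = 0 := hzero rfl
    have hz1 : ∑ j ∈ Finset.range N, castZ (contrib g 0 (0 + j)) = 0 := by
      apply Finset.sum_eq_zero
      intro j hj
      rcases Nat.eq_zero_or_pos j with hj0 | hj0
      · subst hj0
        have h9 : contrib g 0 (0 + ((0:ℕ):Int)) = 0 := by
          unfold contrib
          have hfd : PySem.Int.floordiv (0 + ((0:ℕ):Int) + 1) 2 = 0 := by norm_num
          rw [hfd]
          simp [max_]
        rw [h9, castZ_zero]
      · have hg : getI g (0 + (j:Int)) = 0 := by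
          rw [zero_add]
          exact hsup _ (by omega)
        unfold contrib
        rw [if_pos rfl, hg]
        simp [castZ_zero]
    have hz2 : ∑ j ∈ Finset.range N, wc (Int.toNat 0 + j) * castZ (getI g (j:Int)) = 0 := by
      apply Finset.sum_eq_zero
      intro j hj
      rcases Nat.eq_zero_or_pos j with hj0 | hj0
      · subst hj0
        simp [wc_zero]
      · rw [hsup _ (by omega), castZ_zero, mul_zero]
    rw [hz1, hz2]
    simp
  · have hxpos : 0 < x := by omega
    have hsplit : ∀ j ∈ Finset.range N, castZ (contrib g x (x + j))
        = wc (x.toNat + j) * castZ (getI g (j:Int))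
          + (if (j:Int) < x then castZ (x - PySem.Int.floordiv ((j:Int) + x + 1) 2) * castZ (getI g (j:Int)) else 0) := by
      intro j hj
      have hct : contrib g x (x + j) = max_ (PySem.Int.floordiv (x + j + 1) 2) x * getI g (j:Int) := by
        unfold contrib
        rw [if_neg hx0]
        have h3 : x + (j:Int) - x = (j:Int) := by ring
        rw [h3]
      have hwc : castZ (PySem.Int.floordiv (x + j + 1) 2) = wc (x.toNat + j) := by
        rw [wc]
        congr 2
        push_cast
        omega
      rw [hct, maxsplit, castZ_mul, castZ_add, add_mul, hwc]
      congr 1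
      have harg : x + (j:Int) + 1 = (j:Int) + x + 1 := by ring
      rw [harg]
      by_cases hjx : (j:Int) < x
      · rw [if_pos hjx, if_pos hjx]
      · rw [if_neg hjx, if_neg hjx, castZ_zero, zero_mul]
    rw [Finset.sum_congr rfl hsplit, Finset.sum_add_distrib]
    have hite : ∑ j ∈ Finset.range N,
          (if (j:Int) < x then castZ (x - PySem.Int.floordiv ((j:Int) + x + 1) 2) * castZ (getI g (j:Int)) else 0)
        = ∑ j ∈ Finset.range x.toNat,
            castZ (x - PySem.Int.floordiv ((j:Int) + x + 1) 2) * castZ (getI g (j:Int)) := by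
      have s1 : ∑ j ∈ Finset.range N,
            (if (j:Int) < x then castZ (x - PySem.Int.floordiv ((j:Int) + x + 1) 2) * castZ (getI g (j:Int)) else 0)
          = ∑ j ∈ Finset.range (min x.toNat N),
            (if (j:Int) < x then castZ (x - PySem.Int.floordiv ((j:Int) + x + 1) 2) * castZ (getI g (j:Int)) else 0) := by
        symm
        apply Finset.sum_subset
        · intro j hj
          simp only [Finset.mem_range] at *
          omega
        · intro j hj hnj
          simp only [Finset.mem_range] at hj hnj
          rw [if_neg (by omega)]
      have s2 : ∑ j ∈ Finset.range (min x.toNat N),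
            (if (j:Int) < x then castZ (x - PySem.Int.floordiv ((j:Int) + x + 1) 2) * castZ (getI g (j:Int)) else 0)
          = ∑ j ∈ Finset.range (min x.toNat N),
            castZ (x - PySem.Int.floordiv ((j:Int) + x + 1) 2) * castZ (getI g (j:Int)) :=
        Finset.sum_congr rfl (fun j hj => by
          rw [Finset.mem_range] at hj
          rw [if_pos (by omega)])
      have s3 : ∑ j ∈ Finset.range (min x.toNat N),
            castZ (x - PySem.Int.floordiv ((j:Int) + x + 1) 2) * castZ (getI g (j:Int))
          = ∑ j ∈ Finset.range x.toNat,
            castZ (x - PySem.Int.floordiv ((j:Int) + x + 1) 2) * castZ (getI g (j:Int)) := by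
        apply Finset.sum_subset
        · intro j hj
          simp only [Finset.mem_range] at *
          omega
        · intro j hj hnj
          simp only [Finset.mem_range] at hj hnj
          have hj2 : msum < (j:Int) := by omega
          rw [hsup _ hj2, castZ_zero, mul_zero]
      rw [s1, s2, s3]
    rw [hite]
    ring

lemma outer (u : Int) : ∀ (rest : List Int) (g : List Int) (res ex msum : Int),
    (∀ x ∈ rest, 0 ≤ x) → rest.Pairwise (· ≤ ·) → (∀ x ∈ rest, x = 0 → msum = 0) →
    0 ≤ msum → msum + rest.sum = u → g.length = (u+1).toNat →
    (∀ i : Int, msum < i → getI g i = 0) →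
    0 ≤ res → res < pymod → castZ res = castZ ex + phi g →
    (rest.foldl (passA u) (g, res)).1 = (rest.foldl (passB u) (g, ex)).1 ∧
    (rest.foldl (passA u) (g, res)).1.length = (u+1).toNat ∧
    0 ≤ (rest.foldl (passA u) (g, res)).2 ∧ (rest.foldl (passA u) (g, res)).2 < pymod ∧
    castZ (rest.foldl (passA u) (g, res)).2
      = castZ (rest.foldl (passB u) (g, ex)).2 + phi (rest.foldl (passB u) (g, ex)).1 := by
  intro rest
  induction rest with
  | nil =>
    intro g res ex msum hnn hpw hz hm0 hsum hlen hsup h0 h1 hcast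
    exact ⟨rfl, hlen, h0, h1, hcast⟩
  | cons x rest ih =>
    intro g res ex msum hnn hpw hz hm0 hsum hlen hsup h0 h1 hcast
    have hx : 0 ≤ x := hnn x List.mem_cons_self
    rw [List.pairwise_cons] at hpw
    obtain ⟨hxle, hpw'⟩ := hpw
    have hsnn : 0 ≤ rest.sum := List.sum_nonneg (fun y hy => hnn y (List.mem_cons_of_mem x hy))
    have hsum' : msum + x + rest.sum = u := by rw [← hsum, List.sum_cons]; ring
    have hu0 : 0 ≤ u := by omega
    have hxu : msum + x ≤ u := by omega
    have hglen : (g.length : Int) = u + 1 := by rw [hlen]; omega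
    have hz0 : x = 0 → msum = 0 := fun h => hz x List.mem_cons_self h
    -- A's pass over this x
    obtain ⟨r, heqA, hr0, hr1, hcastr⟩ :=
      passA_ind x hx (u - (x-1)).toNat u g res (by omega) (by omega) h0 h1
    have heqA' : passA u (g, res) x = (updTo g x u, r) := heqA
    -- B's pass over this x
    have hpassB : passB u (g, ex) x = (updTo g x u, (PySem.List.pyRange 0 x).foldl (stepBex x g) ex) := by
      unfold passB
      rw [Prod.mk.injEq]
      exact ⟨tableB_eq g x u hx hu0 hlen, rfl⟩
    have hcastB : castZ ((PySem.List.pyRange 0 x).foldl (stepBex x g) ex)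
        = castZ ex + ((PySem.List.pyRange 0 x).map
            (fun s => castZ ((x - PySem.Int.floordiv (s + x + 1) 2) * getI g s))).sum :=
      foldmod_cast (PySem.List.pyRange 0 x)
        (fun s => (x - PySem.Int.floordiv (s + x + 1) 2) * PySem.List.pyGetD g s 0) ex
    -- the invariant after this pass
    have hlen' : (updTo g x u).length = (u+1).toNat := by
      rw [length_updTo g x u hx (by omega) (by omega), hlen]
    have hsup' : ∀ i : Int, msum + x < i → getI (updTo g x u) i = 0 := by
      intro i hi
      by_cases hiu : i ≤ u
      · rw [getI_updTo_mid g x u i hx (by omega) hiu (by omega)]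
        unfold newv
        rw [hsup i (by omega), hsup (i-x) (by omega), add_zero, mod_eq, Int.zero_emod]
      · exact getI_out _ i (by rw [hlen']; omega)
    have hcast' : castZ r = castZ ((PySem.List.pyRange 0 x).foldl (stepBex x g) ex) + phi (updTo g x u) := by
      rw [hcastr, hcast, hcastB,
        pass_sum g x msum u hx hm0 hxu hlen hsup hz0]
      ring
    rw [List.foldl_cons, List.foldl_cons, heqA', hpassB]
    exact ih (updTo g x u) r ((PySem.List.pyRange 0 x).foldl (stepBex x g) ex) (msum + x)
      (fun y hy => hnn y (List.mem_cons_of_mem x hy)) hpw'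
      (fun y hy hy0 => by
        have h5 : x = 0 := le_antisymm (hy0 ▸ hxle y hy) hx
        rw [hz0 h5, h5]
        norm_num)
      (by omega) hsum' hlen' hsup' hr0 hr1 hcast'

lemma base_sum (t : List Int) (u : Int) (hu0 : 0 ≤ u) (hlen : t.length = (u+1).toNat) :
    ((PySem.List.pyRange 0 (u+1)).map
        (fun s => castZ (PySem.Int.floordiv (s+1) 2 * getI t s))).sum = phi t := by
  rw [PySem.List.pyRange_one 0 (u+1), List.map_map, sum_map_range]
  unfold phi
  rw [phiOff_eq_sum, hlen]
  have h0 : (u + 1 - 0).toNat = (u+1).toNat := by omega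
  rw [h0]
  refine Finset.sum_congr rfl (fun j hj => ?_)
  simp only [Function.comp, zero_add]
  rw [castZ_mul, getI_natCast, wc]

theorem solve_spec : Claim_equal_solve := by
  unfold Claim_equal_solve Spec_solve
  intro n a _ hpre
  unfold solve solve_alt
  dsimp only
  set b := PySem.List.sorted a (fun y => y) false with hb
  set u := b.sum with hu
  have hbnn : ∀ x ∈ b, 0 ≤ x := fun x hx => hpre x ((PySem.List.mem_sorted a _ false x).mp hx)
  have hpw : b.Pairwise (· ≤ ·) := PySem.List.sorted_pairwise a (fun y => y)
  have hu0 : 0 ≤ u := List.sum_nonneg hbnn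
  set g0 : List Int := [(1:Int)] ++ PySem.List.pyRepeat [(0:Int)] u with hg0
  have hinit : PySem.List.pySetD (PySem.List.pyRepeat [(0:Int)] (u+1)) 0 1 = g0 := by
    rw [hg0, PySem.List.pyRepeat_singleton, PySem.List.pyRepeat_singleton,
      PySem.List.pySetD_of_nonneg _ _ (le_refl 0)]
    have h1 : (u+1).toNat = u.toNat + 1 := by omega
    rw [h1, List.replicate_succ]
    rfl
  have hg0' : g0 = 1 :: List.replicate u.toNat 0 := by
    rw [hg0, PySem.List.pyRepeat_singleton]
    rfl
  have hlen0 : g0.length = (u+1).toNat := by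
    rw [hg0']
    simp
    omega
  have hsup0 : ∀ i : Int, 0 < i → getI g0 i = 0 := by
    intro i hi
    rw [hg0', getI_of_nonneg _ _ (by omega), List.getD_eq_getElem?_getD]
    have h2 : i.toNat = (i.toNat - 1) + 1 := by omega
    rw [h2, List.getElem?_cons_succ, List.getElem?_replicate]
    by_cases hlt : i.toNat - 1 < u.toNat
    · rw [if_pos hlt]
      rfl
    · rw [if_neg hlt]
      rfl
  have hphi0 : phi g0 = 0 := by
    rw [hg0']
    unfold phi
    simp only [phiOff]
    rw [phiOff_replicate, wc_zero]
    simp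
  obtain ⟨hT, hlen2, h20, h21, hc2⟩ := outer u b g0 0 0 0 hbnn hpw (fun _ _ _ => rfl)
    (le_refl 0) (by rw [zero_add]) hlen0 hsup0 (le_refl 0) (by norm_num [pymod])
    (by rw [hphi0]; ring)
  rw [hinit]
  set B2 := b.foldl (passB u) (g0, 0) with hB2
  set A2 := b.foldl (passA u) (g0, 0) with hA2
  have hbase : castZ ((PySem.List.pyRange 0 (u+1)).foldl
        (fun bs s => PySem.Int.mod (bs + PySem.Int.floordiv (s+1) 2 * PySem.List.pyGetD B2.1 s 0) pymod) 0)
      = castZ 0 + ((PySem.List.pyRange 0 (u+1)).map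
          (fun s => castZ (PySem.Int.floordiv (s+1) 2 * PySem.List.pyGetD B2.1 s 0))).sum :=
    foldmod_cast (PySem.List.pyRange 0 (u+1))
      (fun s => PySem.Int.floordiv (s+1) 2 * PySem.List.pyGetD B2.1 s 0) 0
  have hlenB : B2.1.length = (u+1).toNat := by rw [← hT]; exact hlen2
  have hbase2 : castZ ((PySem.List.pyRange 0 (u+1)).foldl
        (fun bs s => PySem.Int.mod (bs + PySem.Int.floordiv (s+1) 2 * PySem.List.pyGetD B2.1 s 0) pymod) 0)
      = phi B2.1 := by
    rw [hbase, castZ_zero, zero_add]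
    simp only [getI_def]
    exact base_sum B2.1 u hu0 hlenB
  have hfin : castZ ((PySem.List.pyRange 0 (u+1)).foldl
        (fun bs s => PySem.Int.mod (bs + PySem.Int.floordiv (s+1) 2 * PySem.List.pyGetD B2.1 s 0) pymod) 0
        + B2.2) = castZ A2.2 := by
    rw [castZ_add, hbase2, hc2]
    ring
  have hmodeq : ((PySem.List.pyRange 0 (u+1)).foldl
        (fun bs s => PySem.Int.mod (bs + PySem.Int.floordiv (s+1) 2 * PySem.List.pyGetD B2.1 s 0) pymod) 0
        + B2.2) % ((998244353:ℕ):Int) = A2.2 % ((998244353:ℕ):Int) :=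
    (ZMod.intCast_eq_intCast_iff _ _ 998244353).mp hfin
  have h9 : ((998244353:ℕ):Int) = pymod := by norm_num [pymod]
  rw [h9] at hmodeq
  rw [mod_eq, hmodeq, Int.emod_eq_of_lt h20 h21]
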